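-- pv_equiv track=rewrite | github.com/islam-aymann/challenges-with-python | coderbyte/Arrays/html_elements.py | split_string_to_tags
-- ===== SOURCE A (Python) =====
-- def split_string_to_tags(string):
--     tags = list()
--     i = 0
--     while i < len(string):
--         tag = list()
--         if string[i] == '<':
--             tag.append(string[i])
--             i += 1
--             while i < len(string):
--                 tag.append(string[i])
--                 if string[i] == '>':
--                     tags.append(''.join(tag).replace(' ', '').strip())
--                     break
--                 i += 1
--
--         i += 1
--     return tags
-- ===== SOURCE B (Python) =====
-- def split_string_to_tags(string):
--     tags = []
--     rest = string
--     while True: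
--         _, lt, rest = rest.partition('<')
--         if not lt:
--             return tags
--         body, gt, rest = rest.partition('>')
--         if not gt:
--             return tags
--         tags.append(('<' + body + '>').replace(' ', ''))
-- ===== Notes on version B (the rewrite author's own statement) =====
-- stated objective: simpler
-- what changed: A's char-by-char index state machine with a nested tag-collecting loop is replaced by a loop of str.partition jumps from each '<' to the next '>', with the redundant .strip() dropped (every collected tag already starts with '<' and ends with '>').
import Mathlib
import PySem

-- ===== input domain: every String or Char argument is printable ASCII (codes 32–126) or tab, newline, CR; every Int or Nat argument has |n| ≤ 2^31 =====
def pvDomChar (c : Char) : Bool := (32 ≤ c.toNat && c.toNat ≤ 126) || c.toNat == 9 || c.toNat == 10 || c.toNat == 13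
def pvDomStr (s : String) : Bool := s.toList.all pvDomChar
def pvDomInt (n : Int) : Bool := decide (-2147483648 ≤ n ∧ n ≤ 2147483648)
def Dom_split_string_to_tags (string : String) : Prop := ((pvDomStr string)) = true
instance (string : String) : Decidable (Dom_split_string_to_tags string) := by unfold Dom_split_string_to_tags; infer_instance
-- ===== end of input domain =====

-- B replaces A's char-by-char index state machine by partition-based jumps from '<' to '>'
-- (and drops the strip(), which never removes anything from a '<…>' match); objective: simpler.

-- ===== PORT A =====
-- ''.join(tag).replace(' ', '').strip()
def joinReplStrip (tag : List Char) : String :=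
  PySem.Str.strip (PySem.Str.replace (String.ofList tag) " " "")

-- inner 'while i < len(string)' loop of A: returns (the appended tag string, if any, final i)
def innerA (cs : List Char) (i : Nat) (tag : List Char) : Option String × Nat :=
  if h : i < cs.length then
    if cs[i] = '>' then (some (joinReplStrip (tag ++ [cs[i]])), i)
    else innerA cs (i + 1) (tag ++ [cs[i]])
  else (none, i)
termination_by cs.length - i

-- the inner loop never moves i backwards (used only for outerA's termination)
theorem innerA_ge (cs : List Char) : ∀ (k i : Nat) (tag : List Char),
    cs.length - i ≤ k → i ≤ (innerA cs i tag).2 := by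
  intro k
  induction k with
  | zero =>
    intro i tag hk
    rw [innerA]
    split
    · omega
    · exact Nat.le_refl i
  | succ k ih =>
    intro i tag hk
    rw [innerA]
    split
    · split
      · exact Nat.le_refl i
      · have := ih (i + 1) (tag ++ [cs[i]]) (by omega)
        omega
    · exact Nat.le_refl i

-- outer 'while i < len(string)' loop of A
def outerA (cs : List Char) (i : Nat) (tags : List String) : List String :=
  if h : i < cs.length then
    if cs[i] = '<' then
      let r := innerA cs (i + 1) [cs[i]]
      let tags' := match r.1 with
        | some t => tags ++ [t]
        | none => tags
      outerA cs (r.2 + 1) tags'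
    else outerA cs (i + 1) tags
  else tags
termination_by cs.length - i
decreasing_by
  · have := innerA_ge cs (cs.length - (i + 1)) (i + 1) [cs[i]] (Nat.le_refl _)
    omega
  · omega

def split_string_to_tags (string : String) : List String :=
  outerA string.toList 0 []

-- ===== PORT B =====
-- exact hand port of Python's s.partition(sep) for a one-char separator:
-- returns (before, the matched separator or '' , after); the separator matches at the
-- first position where the char equals sep, hence takeWhile/dropWhile on (· != sep)
def part (sep : Char) (s : List Char) : List Char × List Char × List Char :=
  (s.takeWhile (· != sep), (s.dropWhile (· != sep)).take 1, (s.dropWhile (· != sep)).tail)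

-- the dropWhile result is non-empty exactly when the separator occurs (used for termination)
theorem part_after_lt (sep : Char) (s : List Char)
    (h : ((part sep s).2.1).isEmpty = false) : (part sep s).2.2.length < s.length := by
  unfold part at h ⊢
  simp only
  cases hdw : s.dropWhile (· != sep) with
  | nil => rw [hdw] at h; simp at h
  | cons a l =>
    have := List.length_dropWhile_le (fun x => x != sep) s
    rw [hdw] at this
    simp only [List.tail_cons]
    simp at this
    omega

theorem part_after_le (sep : Char) (s : List Char) : (part sep s).2.2.length ≤ s.length := by
  unfold part
  simp only
  have h1 := List.length_dropWhile_le (fun x => x != sep) s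
  have h2 : (s.dropWhile (· != sep)).tail.length
      = (s.dropWhile (· != sep)).length - 1 := List.length_tail
  omega

-- loop of Source B on the remaining suffix: jump to the next '<', then to the next '>'
def tagsLoop (rest : List Char) (tags : List String) : List String :=
  if h1 : ((part '<' rest).2.1).isEmpty then tags         -- if not lt: return tags
  else if ((part '>' (part '<' rest).2.2).2.1).isEmpty then tags    -- if not gt: return tags
  else
    tagsLoop (part '>' (part '<' rest).2.2).2.2
      (tags ++ [PySem.Str.replace (String.ofList
        ('<' :: ((part '>' (part '<' rest).2.2).1 ++ ['>']))) " " ""])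
termination_by rest.length
decreasing_by
  have ha := part_after_lt '<' rest (by simpa using h1)
  have hb := part_after_le '>' (part '<' rest).2.2
  omega

def split_string_to_tags_alt (string : String) : List String :=
  tagsLoop string.toList []

-- ===== PRECONDITION & SPEC =====
def Spec_split_string_to_tags (string : String) (out : List String) : Prop := out = split_string_to_tags_alt string
instance (string : String) (out : List String) : Decidable (Spec_split_string_to_tags string out) := by unfold Spec_split_string_to_tags; infer_instance

-- ===== CLAIM (what is proved, stated in full; the proofs are below) =====
def Claim_equal_split_string_to_tags : Prop := ∀ (string : String), Dom_split_string_to_tags string → Spec_split_string_to_tags string (split_string_to_tags string)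

-- ===== LEMMAS AND PROOFS =====

-- replace(' ', '') on a char list is filtering out the spaces
theorem replace_go_space : ∀ (fuel : Nat) (l acc : List Char), l.length ≤ fuel →
    PySem.Chars.replace.go [' '] [] fuel l acc = acc.reverse ++ l.filter (· ≠ ' ') := by
  intro fuel
  induction fuel with
  | zero =>
    intro l acc hl
    have : l = [] := List.eq_nil_of_length_eq_zero (by omega)
    subst this
    simp [PySem.Chars.replace.go]
  | succ k ih =>
    intro l acc hl
    cases l with
    | nil => simp [PySem.Chars.replace.go]
    | cons c t =>
      rw [PySem.Chars.replace.go]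
      by_cases hc : c = ' '
      · subst hc
        simp only [List.isPrefixOf, BEq.rfl, Bool.true_and, if_pos]
        rw [show List.drop [' '].length (' ' :: t) = t by simp]
        simp only [List.reverse_nil, List.nil_append]
        rw [ih t acc (by simpa using Nat.le_of_succ_le_succ hl)]
        simp
      · have hpre : [' '].isPrefixOf (c :: t) = false := by
          simp [List.isPrefixOf]
          intro h; exact absurd h.symm hc
        rw [hpre]
        simp only [Bool.false_eq_true, if_false]
        rw [ih t (c :: acc) (by simpa using Nat.le_of_succ_le_succ hl)]
        simp [hc]

theorem chars_replace_space (cs : List Char) :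
    PySem.Chars.replace cs [' '] [] = cs.filter (· ≠ ' ') := by
  rw [PySem.Chars.replace]
  simp only [List.isEmpty_cons, Bool.false_eq_true, if_false]
  exact replace_go_space cs.length cs [] (Nat.le_refl _)

-- stripping a string that starts with '<' and ends with '>' does nothing
theorem strip_tag (xs : List Char) :
    PySem.Chars.strip ('<' :: (xs ++ ['>'])) = '<' :: (xs ++ ['>']) := by
  rw [PySem.Chars.strip, PySem.Chars.lstrip, PySem.Chars.rstrip]
  rw [List.dropWhile_cons]
  have h1 : PySem.Chars.isspace '<' = false := by decide
  have h2 : PySem.Chars.isspace '>' = false := by decide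
  simp only [h1, Bool.false_eq_true, if_false]
  rw [show ('<' :: (xs ++ ['>'])).reverse = '>' :: (xs.reverse ++ ['<']) by simp]
  rw [List.dropWhile_cons]
  simp [h2]

-- A's joined-replaced-stripped tag equals B's replaced tag, on the '<…>' shape
theorem joinReplStrip_eq (mid : List Char) :
    joinReplStrip ('<' :: (mid ++ ['>'])) =
      PySem.Str.replace (String.ofList ('<' :: (mid ++ ['>']))) " " "" := by
  have hsp : (" " : String).toList = [' '] := by decide
  have hem : ("" : String).toList = [] := by decide
  have hrepl : PySem.Str.replace (String.ofList ('<' :: (mid ++ ['>']))) " " ""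
      = String.ofList ('<' :: (mid.filter (· ≠ ' ') ++ ['>'])) := by
    rw [PySem.Str.replace]
    simp only [String.toList_ofList, hsp, hem]
    rw [chars_replace_space]
    simp [List.filter_append]
  rw [joinReplStrip, hrepl, PySem.Str.strip]
  simp only [String.toList_ofList]
  rw [strip_tag]

-- dropWhile is drop of the takeWhile length
theorem dropWhile_eq_drop_len (p : Char → Bool) : ∀ (l : List Char),
    l.dropWhile p = l.drop (l.takeWhile p).length := by
  intro l
  induction l with
  | nil => rfl
  | cons c t ih =>
    rw [List.dropWhile_cons, List.takeWhile_cons]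
    by_cases hp : p c = true
    · rw [if_pos hp, if_pos hp]
      simpa using ih
    · rw [if_neg hp, if_neg hp]
      rfl

-- characterisation of A's inner loop: it returns the tag built from the chars up to the
-- first '>' after i (and that index), or none with i driven to the end
theorem innerA_eq (cs : List Char) : ∀ (k i : Nat) (tag : List Char),
    cs.length - i ≤ k → i ≤ cs.length →
    innerA cs i tag =
      if i + ((cs.drop i).takeWhile (· != '>')).length < cs.length then
        (some (joinReplStrip (tag ++ (cs.drop i).takeWhile (· != '>') ++ ['>'])),
         i + ((cs.drop i).takeWhile (· != '>')).length)
      else (none, cs.length) := by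
  intro k
  induction k with
  | zero =>
    intro i tag hk hi
    have hie : i = cs.length := by omega
    rw [innerA]
    subst hie
    simp
  | succ k ih =>
    intro i tag hk hi
    rw [innerA]
    by_cases h : i < cs.length
    · simp only [dif_pos h]
      have hdrop : cs.drop i = cs[i] :: cs.drop (i + 1) := List.drop_eq_getElem_cons h
      by_cases hgt : cs[i] = '>'
      · simp only [if_pos hgt]
        rw [hdrop, hgt]
        rw [show List.takeWhile (· != '>') ('>' :: cs.drop (i + 1)) = [] by simp]
        simp only [List.length_nil, Nat.add_zero, if_pos h, List.append_nil]
      · simp only [if_neg hgt]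
        rw [ih (i + 1) (tag ++ [cs[i]]) (by omega) (by omega)]
        rw [hdrop, List.takeWhile_cons]
        rw [show (cs[i] != '>') = true by simpa using hgt]
        simp only [if_true, List.length_cons]
        have harr : i + (((cs.drop (i + 1)).takeWhile (· != '>')).length + 1)
            = i + 1 + ((cs.drop (i + 1)).takeWhile (· != '>')).length := by omega
        rw [harr]
        by_cases hc : i + 1 + ((cs.drop (i + 1)).takeWhile (· != '>')).length < cs.length
        · rw [if_pos hc, if_pos hc]
          congr 3
          simp
        · rw [if_neg hc, if_neg hc]
    · have hie : i = cs.length := by omega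
      subst hie
      simp

-- B's loop on the empty suffix
theorem tagsLoop_nil (tags : List String) : tagsLoop [] tags = tags := by
  rw [tagsLoop]
  simp [part]

-- B's loop ignores a leading character that is not '<'
theorem tagsLoop_cons_ne (c : Char) (t : List Char) (tags : List String) (hc : c ≠ '<') :
    tagsLoop (c :: t) tags = tagsLoop t tags := by
  have h2 : (part '<' (c :: t)).2 = (part '<' t).2 := by
    unfold part
    rw [List.dropWhile_cons]
    simp [hc]
  rw [tagsLoop, h2]
  conv_rhs => rw [tagsLoop]

-- B's loop at a '<' whose tag is closed by a later '>'
theorem tagsLoop_tag_found (t : List Char) (tags : List String)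
    (hf : (t.takeWhile (· != '>')).length < t.length) :
    tagsLoop ('<' :: t) tags
      = tagsLoop (t.drop ((t.takeWhile (· != '>')).length + 1))
          (tags ++ [PySem.Str.replace (String.ofList
            ('<' :: (t.takeWhile (· != '>') ++ ['>']))) " " ""]) := by
  have hpart : part '<' ('<' :: t) = ([], ['<'], t) := by simp [part]
  have hdw : t.dropWhile (· != '>') = t.drop (t.takeWhile (· != '>')).length :=
    dropWhile_eq_drop_len _ t
  have hdnil : t.drop (t.takeWhile (· != '>')).length ≠ [] := by
    intro hcon
    have := congrArg List.length hcon
    simp only [List.length_drop, List.length_nil] at this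
    omega
  rw [tagsLoop, hpart]
  simp only [List.isEmpty_cons, Bool.false_eq_true, dite_false]
  have hgt : ((part '>' t).2.1).isEmpty = false := by
    unfold part
    simp only
    rw [hdw]
    cases hx : t.drop (t.takeWhile (· != '>')).length with
    | nil => exact absurd hx hdnil
    | cons a l => simp
  rw [hgt]
  simp only [Bool.false_eq_true, if_false]
  congr 1
  show (t.dropWhile (· != '>')).tail = _
  rw [hdw, List.tail_drop]

-- B's loop at a '<' with no closing '>' afterwards
theorem tagsLoop_tag_none (t : List Char) (tags : List String)
    (hf : (t.takeWhile (· != '>')).length = t.length) :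
    tagsLoop ('<' :: t) tags = tags := by
  have hpart : part '<' ('<' :: t) = ([], ['<'], t) := by simp [part]
  have hdw : t.dropWhile (· != '>') = t.drop (t.takeWhile (· != '>')).length :=
    dropWhile_eq_drop_len _ t
  rw [tagsLoop, hpart]
  simp only [List.isEmpty_cons, Bool.false_eq_true, dite_false]
  have hgt : ((part '>' t).2.1).isEmpty = true := by
    unfold part
    simp only
    rw [hdw, hf, List.drop_length]
    rfl
  rw [hgt]
  simp

-- the two loops agree: A's outer loop from index i is B's loop on the suffix cs.drop i
theorem outer_eq_tagsLoop (cs : List Char) : ∀ (k i : Nat) (tags : List String),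
    cs.length - i ≤ k → outerA cs i tags = tagsLoop (cs.drop i) tags := by
  intro k
  induction k with
  | zero =>
    intro i tags hk
    have hdrop : cs.drop i = [] := List.drop_eq_nil_of_le (by omega)
    rw [outerA, hdrop, tagsLoop_nil]
    split
    · omega
    · rfl
  | succ k ih =>
    intro i tags hk
    by_cases h : i < cs.length
    · have hdrop : cs.drop i = cs[i] :: cs.drop (i + 1) := List.drop_eq_getElem_cons h
      by_cases hlt : cs[i] = '<'
      · -- A enters the tag branch; B's partition finds this '<'
        have hinner := innerA_eq cs (cs.length - (i + 1)) (i + 1) [cs[i]] (Nat.le_refl _) (by omega)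
        have hmlen : ((cs.drop (i + 1)).takeWhile (· != '>')).length
            ≤ (cs.drop (i + 1)).length := (List.takeWhile_prefix _).length_le
        have hlen1 : (cs.drop (i + 1)).length = cs.length - (i + 1) := by simp
        by_cases hfound : i + 1 + ((cs.drop (i + 1)).takeWhile (· != '>')).length < cs.length
        · rw [if_pos hfound] at hinner
          rw [outerA]
          simp only [dif_pos h, if_pos hlt, hinner]
          rw [ih (i + 1 + ((cs.drop (i + 1)).takeWhile (· != '>')).length + 1) _ (by omega)]
          have hstr : joinReplStrip ([cs[i]] ++ (cs.drop (i + 1)).takeWhile (· != '>') ++ ['>'])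
              = PySem.Str.replace (String.ofList
                  ('<' :: ((cs.drop (i + 1)).takeWhile (· != '>') ++ ['>']))) " " "" := by
            rw [hlt]
            rw [show ([('<' : Char)] ++ (cs.drop (i + 1)).takeWhile (· != '>') ++ ['>'])
                = '<' :: ((cs.drop (i + 1)).takeWhile (· != '>') ++ ['>']) by simp]
            exact joinReplStrip_eq _
          rw [hstr]
          rw [hdrop, hlt]
          rw [tagsLoop_tag_found (cs.drop (i + 1)) tags (by omega)]
          congr 1
          rw [List.drop_drop]
          all_goals congr 1
          all_goals omega
        · rw [if_neg hfound] at hinner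
          rw [outerA]
          simp only [dif_pos h, if_pos hlt, hinner]
          rw [ih (cs.length + 1) tags (by omega)]
          rw [List.drop_eq_nil_of_le (by omega), tagsLoop_nil]
          rw [hdrop, hlt]
          rw [tagsLoop_tag_none (cs.drop (i + 1)) tags (by omega)]
      · -- A skips this char; so does B's partition scan
        rw [outerA]
        simp only [dif_pos h, if_neg hlt]
        rw [ih (i + 1) tags (by omega)]
        rw [hdrop, tagsLoop_cons_ne _ _ _ hlt]
    · have hdrop : cs.drop i = [] := List.drop_eq_nil_of_le (by omega)
      rw [outerA, dif_neg h, hdrop, tagsLoop_nil]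

-- ===== VERDICT (by name: the statement is the Claim_ definition above) =====
theorem split_string_to_tags_spec : Claim_equal_split_string_to_tags := by
  intro string _
  unfold Spec_split_string_to_tags split_string_to_tags split_string_to_tags_alt
  rw [outer_eq_tagsLoop string.toList string.toList.length 0 [] (by omega)]
  rfl
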